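-- pv_equiv track=rewrite | github.com/fabwer/aoc-2020 | src/day_11/aoc_11_utils.py | get_adjacent_cells
-- ===== SOURCE A (Python) =====
-- def get_adjacent_cells(matrix, x_coord, y_coord, adjacency, direction):
--     for dx, dy in adjacency:
--         if 0 <= (x_coord + dx) < len(matrix) and 0 <= y_coord + dy < len(matrix[0]):
--             dx_res = dx
--             dy_res = dy
--             if direction:
--                 while True:
--                     if not (0 <= (x_coord + dx_res) < len(matrix) and 0 <= (y_coord + dy_res) < len(matrix[0])):
--                         dx_res -= dx
--                         dy_res -= dy
--                         break
--                     if matrix[x_coord + dx_res][y_coord + dy_res] != '.':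
--                         break
--                     dx_res += dx
--                     dy_res += dy
--             yield matrix[x_coord + dx_res][y_coord + dy_res]
-- ===== SOURCE B (Python) =====
-- def get_adjacent_cells(matrix, x_coord, y_coord, adjacency, direction):
--     rows = len(matrix)
--     cols = len(matrix[0]) if matrix else 0
--     for dx, dy in adjacency:
--         if 0 <= x_coord + dx < rows and 0 <= y_coord + dy < cols:
--             if direction:
--                 # collect the ray's cells; rows+cols steps always suffice to leave the grid
--                 ray = []
--                 s = 1
--                 while s <= rows + cols and 0 <= x_coord + s * dx < rows and 0 <= y_coord + s * dy < cols:
--                     ray.append(matrix[x_coord + s * dx][y_coord + s * dy])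
--                     s += 1
--                 yield next((c for c in ray if c != '.'), ray[-1])
--             else:
--                 yield matrix[x_coord + dx][y_coord + dy]
-- ===== Notes on version B (the rewrite author's own statement) =====
-- stated objective: alternative
-- what changed: Per direction B first materializes the list of ray cell values while positions stay in bounds (capped at rows+cols steps, which always suffice to leave the grid), then yields the first non-'.' value with a fallback to the last ray cell, replacing A's stateful walk that mutates dx_res/dy_res and steps back on leaving the grid.
-- outside the precondition, e.g. on get_adjacent_cells([['#', '#'], ['#']], 0, 0, [(1, 0)], False): A returns ['#'], B returns ['#']
import Mathlib
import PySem

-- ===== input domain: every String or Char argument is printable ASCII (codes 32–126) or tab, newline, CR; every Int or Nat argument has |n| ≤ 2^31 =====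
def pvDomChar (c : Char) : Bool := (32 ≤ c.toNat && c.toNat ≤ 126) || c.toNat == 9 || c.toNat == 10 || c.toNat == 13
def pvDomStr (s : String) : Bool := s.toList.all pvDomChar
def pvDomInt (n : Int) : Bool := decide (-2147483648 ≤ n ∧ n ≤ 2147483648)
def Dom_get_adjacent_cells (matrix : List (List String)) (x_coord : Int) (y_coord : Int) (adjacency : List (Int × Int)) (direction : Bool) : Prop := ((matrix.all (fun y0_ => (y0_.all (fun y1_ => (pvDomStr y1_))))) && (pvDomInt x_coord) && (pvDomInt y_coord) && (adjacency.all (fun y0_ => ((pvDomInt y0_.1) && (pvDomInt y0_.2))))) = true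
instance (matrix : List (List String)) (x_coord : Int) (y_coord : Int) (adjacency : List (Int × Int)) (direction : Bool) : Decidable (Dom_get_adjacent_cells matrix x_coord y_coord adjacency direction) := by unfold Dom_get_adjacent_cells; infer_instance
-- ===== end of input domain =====

-- B replaces A's stateful step-back walk by building, per direction, the list of in-bounds
-- ray cells (length capped by rows+cols, which always suffices to leave the grid) and
-- picking the first non-'.' one with a last-cell fallback (objective: alternative).
-- Both versions are generators; equivalence is about the list of yielded values.

-- shared primitive helpers (bounds test and in-bounds cell read, used verbatim by both ports)
def pvInb (matrix : List (List String)) (i j : Int) : Bool :=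
  decide (0 ≤ i ∧ i < (matrix.length : Int) ∧ 0 ≤ j ∧ j < ((matrix.headD []).length : Int))

def pvCell (matrix : List (List String)) (i j : Int) : String :=
  (PySem.List.pyGet? ((PySem.List.pyGet? matrix i).getD []) j).getD ""

-- ===== PORT A =====
-- A's inner 'while True' walk; fuel only makes it total (rows+cols+2 always suffices
-- for a non-zero direction, see pvFuel_enough below); out-of-fuel value = step back.
def pvWalk (matrix : List (List String)) (x y dx dy : Int) :
    Int → Int → Nat → Int × Int
  | dxr, dyr, 0 => (dxr - dx, dyr - dy)
  | dxr, dyr, f+1 =>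
    if pvInb matrix (x + dxr) (y + dyr) = false then (dxr - dx, dyr - dy)
    else if pvCell matrix (x + dxr) (y + dyr) ≠ "." then (dxr, dyr)
    else pvWalk matrix x y dx dy (dxr + dx) (dyr + dy) f

def get_adjacent_cells (matrix : List (List String)) (x_coord : Int) (y_coord : Int) (adjacency : List (Int × Int)) (direction : Bool) : List String :=
  adjacency.foldl (fun acc p =>
    if pvInb matrix (x_coord + p.1) (y_coord + p.2) = true then
      acc ++ [pvCell matrix
        (x_coord + (if direction then pvWalk matrix x_coord y_coord p.1 p.2 p.1 p.2 (matrix.length + (matrix.headD []).length + 2) else (p.1, p.2)).1)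
        (y_coord + (if direction then pvWalk matrix x_coord y_coord p.1 p.2 p.1 p.2 (matrix.length + (matrix.headD []).length + 2) else (p.1, p.2)).2)]
    else acc) []

-- ===== PORT B =====
-- the ray's cell values at steps s, s+1, …: collected while s ≤ rows+cols and the position
-- is in bounds (fuel only makes the recursion structural; it exceeds the cap, so it never cuts)
def pvRay (matrix : List (List String)) (x y dx dy : Int) :
    Int → Nat → List String
  | _, 0 => []
  | s, f+1 =>
    if s ≤ ((matrix.length + (matrix.headD []).length : Nat) : Int)
        ∧ pvInb matrix (x + s * dx) (y + s * dy) = true then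
      pvCell matrix (x + s * dx) (y + s * dy) :: pvRay matrix x y dx dy (s + 1) f
    else []

-- next((c for c in ray if c != '.'), ray[-1])
def pvPick (r : List String) : String :=
  (r.find? (fun c => c != ".")).getD ((PySem.List.pyGet? r (-1)).getD "")

def get_adjacent_cells_alt (matrix : List (List String)) (x_coord : Int) (y_coord : Int) (adjacency : List (Int × Int)) (direction : Bool) : List String :=
  adjacency.foldl (fun acc p =>
    if pvInb matrix (x_coord + p.1) (y_coord + p.2) = true then
      acc ++ [if direction then
        pvPick (pvRay matrix x_coord y_coord p.1 p.2 1 (matrix.length + (matrix.headD []).length + 2))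
      else pvCell matrix (x_coord + p.1) (y_coord + p.2)]
    else acc) []

-- ===== PRECONDITION & SPEC =====
-- Pre_ excludes (a) grids with a row shorter than row 0 when some direction passes the
-- bounds guard (A can raise IndexError there; where the indexed cells happen to exist both
-- programs agree), and (b) ray mode with the degenerate direction (0,0) on an in-bounds
-- floor cell ".", where A's while-loop never terminates.
def Pre_get_adjacent_cells (matrix : List (List String)) (x_coord : Int) (y_coord : Int) (adjacency : List (Int × Int)) (direction : Bool) : Prop :=
  ((∃ p ∈ adjacency, pvInb matrix (x_coord + p.1) (y_coord + p.2) = true) →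
      ∀ row ∈ matrix, (matrix.headD []).length ≤ row.length)
  ∧ (direction = true → ∀ p ∈ adjacency, (p.1 = 0 ∧ p.2 = 0) →
      ¬ (pvInb matrix x_coord y_coord = true ∧ pvCell matrix x_coord y_coord = "."))

instance (matrix : List (List String)) (x_coord : Int) (y_coord : Int) (adjacency : List (Int × Int)) (direction : Bool) : Decidable (Pre_get_adjacent_cells matrix x_coord y_coord adjacency direction) := by unfold Pre_get_adjacent_cells; infer_instance

def pvWitness_get_adjacent_cells : List (List String) × Int × Int × (List (Int × Int)) × Bool :=
  ([[".", "#"], ["L", "."]], 0, 0, [(0, 1), (1, 1)], true)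

def Spec_get_adjacent_cells (matrix : List (List String)) (x_coord : Int) (y_coord : Int) (adjacency : List (Int × Int)) (direction : Bool) (out : List String) : Prop := out = get_adjacent_cells_alt matrix x_coord y_coord adjacency direction
instance (matrix : List (List String)) (x_coord : Int) (y_coord : Int) (adjacency : List (Int × Int)) (direction : Bool) (out : List String) : Decidable (Spec_get_adjacent_cells matrix x_coord y_coord adjacency direction out) := by unfold Spec_get_adjacent_cells; infer_instance

-- ===== CLAIM (what is proved, stated in full; the proofs are below) =====
def Claim_equal_get_adjacent_cells : Prop := ∀ (matrix : List (List String)) (x_coord : Int) (y_coord : Int) (adjacency : List (Int × Int)) (direction : Bool), Dom_get_adjacent_cells matrix x_coord y_coord adjacency direction → Pre_get_adjacent_cells matrix x_coord y_coord adjacency direction → Spec_get_adjacent_cells matrix x_coord y_coord adjacency direction (get_adjacent_cells matrix x_coord y_coord adjacency direction)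

-- ===== LEMMAS AND PROOFS =====

-- proof-side uncapped ray (the cap in pvRay never bites for a non-zero direction)
def pvRayU (matrix : List (List String)) (x y dx dy : Int) :
    Int → Nat → List String
  | _, 0 => []
  | s, f+1 =>
    if pvInb matrix (x + s * dx) (y + s * dy) = true then
      pvCell matrix (x + s * dx) (y + s * dy) :: pvRayU matrix x y dx dy (s + 1) f
    else []

-- the '.'-head of a pick is dropped when the tail is non-empty
lemma pvPick_dot_cons (r : List String) (h : r ≠ []) : pvPick ("." :: r) = pvPick r := by
  cases r with
  | nil => exact absurd rfl h
  | cons a t =>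
    unfold pvPick
    rw [List.find?_cons_of_neg (by simp), PySem.List.pyGet?_neg_one,
        PySem.List.pyGet?_neg_one, List.getLast?_cons_cons]

lemma pvPick_nondot_cons (c : String) (r : List String) (h : c ≠ ".") :
    pvPick (c :: r) = c := by
  unfold pvPick
  rw [List.find?_cons_of_pos (by simpa using h)]
  rfl

lemma pvPick_dot_nil : pvPick ["."] = "." := by decide

-- a step index with an in-bounds position cannot exceed rows+cols (non-zero direction,
-- step 1 in bounds)
lemma pvStep_bound (matrix : List (List String)) (x y dx dy s : Int)
    (hz : ¬ (dx = 0 ∧ dy = 0))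
    (h1 : pvInb matrix (x + dx) (y + dy) = true)
    (hs : 1 ≤ s)
    (hin : pvInb matrix (x + s * dx) (y + s * dy) = true) :
    s ≤ ((matrix.length + (matrix.headD []).length : Nat) : Int) := by
  unfold pvInb at h1 hin
  rw [decide_eq_true_eq] at h1 hin
  obtain ⟨a1, a2, a3, a4⟩ := h1
  obtain ⟨b1, b2, b3, b4⟩ := hin
  push_cast
  rcases not_and_or.mp hz with hdx | hdy
  · rcases lt_or_gt_of_ne hdx with hneg | hpos
    · nlinarith
    · nlinarith
  · rcases lt_or_gt_of_ne hdy with hneg | hpos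
    · nlinarith
    · nlinarith

-- for a non-zero direction with step 1 in bounds, the capped and uncapped rays coincide
lemma pvRay_eq_pvRayU (matrix : List (List String)) (x y dx dy : Int)
    (hz : ¬ (dx = 0 ∧ dy = 0))
    (h1 : pvInb matrix (x + dx) (y + dy) = true) :
    ∀ (f : Nat) (s : Int), 1 ≤ s →
      pvRay matrix x y dx dy s f = pvRayU matrix x y dx dy s f := by
  intro f
  induction f with
  | zero => intro s _; rw [pvRay, pvRayU]
  | succ g ih =>
    intro s hs
    rw [pvRay, pvRayU]
    by_cases hin : pvInb matrix (x + s * dx) (y + s * dy) = true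
    · rw [if_pos ⟨pvStep_bound matrix x y dx dy s hz h1 hs hin, hin⟩, if_pos hin,
        ih (s + 1) (by omega)]
    · rw [if_neg (by tauto), if_neg hin]

-- core correspondence: A's walk lands on the cell B's pick selects, for every fuel n such
-- that the ray leaves the grid within n steps
lemma walk_eq_pick (matrix : List (List String)) (x y dx dy : Int) :
    ∀ (n : Nat) (s : Int),
      pvInb matrix (x + s * dx) (y + s * dy) = true →
      pvInb matrix (x + (s + n) * dx) (y + (s + n) * dy) = false →
      pvCell matrix (x + (pvWalk matrix x y dx dy (s * dx) (s * dy) n).1)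
                    (y + (pvWalk matrix x y dx dy (s * dx) (s * dy) n).2)
        = pvPick (pvRayU matrix x y dx dy s n) := by
  intro n
  induction n with
  | zero =>
    intro s h1 h2
    simp only [Nat.cast_zero, add_zero] at h2
    rw [h1] at h2; cases h2
  | succ m ih =>
    intro s h1 h2
    rw [pvWalk, pvRayU, h1, if_neg (by simp), if_pos rfl]
    by_cases hc : pvCell matrix (x + s * dx) (y + s * dy) = "."
    · rw [if_neg (by simp [hc]), hc]
      have hstep : s * dx + dx = (s + 1) * dx := by ring
      have hstep' : s * dy + dy = (s + 1) * dy := by ring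
      rw [hstep, hstep']
      by_cases hnb : pvInb matrix (x + (s + 1) * dx) (y + (s + 1) * dy) = true
      · -- next position still in bounds: recurse on both sides
        have h2' : pvInb matrix (x + ((s + 1) + m) * dx) (y + ((s + 1) + m) * dy) = false := by
          have : (s + 1) + (m : Int) = s + ((m : Nat) + 1 : Nat) := by push_cast; ring
          rw [this]; exact h2
        have hrec := ih (s + 1) hnb h2'
        have hm : m ≠ 0 := by
          intro h0; subst h0
          simp only [Nat.cast_zero, add_zero] at h2'
          rw [hnb] at h2'; cases h2'
        obtain ⟨k, rfl⟩ := Nat.exists_eq_succ_of_ne_zero hm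
        rw [hrec, pvPick_dot_cons]
        rw [pvRayU, hnb, if_pos rfl]
        exact List.cons_ne_nil _ _
      · -- next position out of bounds: walk steps back, ray tail empty
        have hnb' : pvInb matrix (x + (s + 1) * dx) (y + (s + 1) * dy) = false :=
          Bool.eq_false_iff.mpr hnb
        have hray : pvRayU matrix x y dx dy (s + 1) m = [] := by
          cases m with
          | zero => rw [pvRayU]
          | succ k => rw [pvRayU, hnb', if_neg (by simp)]
        have hwalk : pvWalk matrix x y dx dy ((s+1) * dx) ((s+1) * dy) m
            = ((s+1) * dx - dx, (s+1) * dy - dy) := by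
          cases m with
          | zero => rw [pvWalk]
          | succ k => rw [pvWalk, hnb', if_pos rfl]
        rw [hwalk, hray]
        have e1 : x + ((s+1) * dx - dx) = x + s * dx := by ring
        have e2 : y + ((s+1) * dy - dy) = y + s * dy := by ring
        simp only [e1, e2]
        rw [hc, pvPick_dot_nil]
    · rw [if_pos hc]
      exact (pvPick_nondot_cons _ _ hc).symm

-- the fixed fuel rows+cols+2 drives any non-zero direction out of bounds
lemma pvFuel_enough (matrix : List (List String)) (x y dx dy : Int)
    (hz : ¬ (dx = 0 ∧ dy = 0))
    (h1 : pvInb matrix (x + dx) (y + dy) = true) :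
    pvInb matrix (x + (1 + ((matrix.length + (matrix.headD []).length + 2 : Nat) : Int)) * dx)
                 (y + (1 + ((matrix.length + (matrix.headD []).length + 2 : Nat) : Int)) * dy) = false := by
  set R : Int := (matrix.length : Int) with hR
  set C : Int := ((matrix.headD []).length : Int) with hC
  have hF : (1 + ((matrix.length + (matrix.headD []).length + 2 : Nat) : Int)) = R + C + 3 := by
    push_cast [hR, hC]; ring
  rw [hF]
  unfold pvInb at h1 ⊢
  rw [decide_eq_true_eq] at h1
  rw [decide_eq_false_iff_not]
  obtain ⟨ha, hb, hc, hd⟩ := h1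
  have hR0 : 0 ≤ R := by simp [hR]
  have hC0 : 0 ≤ C := by simp [hC]
  intro ⟨g1, g2, g3, g4⟩
  rcases not_and_or.mp hz with hdx | hdy
  · rcases lt_or_gt_of_ne hdx with hneg | hpos
    · nlinarith [g1, ha, hb, hneg, hR0, hC0]
    · nlinarith [g2, ha, hb, hpos, hR0, hC0]
  · rcases lt_or_gt_of_ne hdy with hneg | hpos
    · nlinarith [g3, hc, hd, hneg, hR0, hC0]
    · nlinarith [g4, hc, hd, hpos, hR0, hC0]

-- the zero direction on a non-floor in-bounds cell: both sides return that cell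
lemma pvZero_dir (matrix : List (List String)) (x y : Int) (f : Nat)
    (hin : pvInb matrix x y = true)
    (hc : pvCell matrix x y ≠ ".") :
    pvCell matrix (x + (pvWalk matrix x y 0 0 0 0 (f + 1)).1)
                  (y + (pvWalk matrix x y 0 0 0 0 (f + 1)).2)
      = pvPick (pvRay matrix x y 0 0 1 (f + 1)) := by
  have hin' : pvInb matrix (x + 0) (y + 0) = true := by simpa using hin
  have hc' : pvCell matrix (x + 0) (y + 0) ≠ "." := by simpa using hc
  rw [pvWalk, if_neg (by simp [hin]), if_pos hc']
  have hRC : (1 : Int) ≤ ((matrix.length + (matrix.headD []).length : Nat) : Int) := by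
    unfold pvInb at hin
    rw [decide_eq_true_eq] at hin
    push_cast; omega
  rw [pvRay, if_pos ⟨hRC, by simpa using hin'⟩]
  simp only [one_mul]
  rw [pvPick_nondot_cons _ _ hc']

-- generic congruence for the common fold shape of the two ports
lemma pvFoldl_guard_congr (g : Int × Int → Bool) (v w : Int × Int → String) :
    ∀ (l : List (Int × Int)) (acc : List String),
      (∀ p ∈ l, g p = true → v p = w p) →
      l.foldl (fun acc p => if g p = true then acc ++ [v p] else acc) acc
        = l.foldl (fun acc p => if g p = true then acc ++ [w p] else acc) acc := by
  intro l
  induction l with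
  | nil => intro acc _; rfl
  | cons a t ih =>
    intro acc h
    simp only [List.foldl_cons]
    by_cases hg : g a = true
    · rw [if_pos hg, if_pos hg, h a (List.mem_cons_self) hg]
      exact ih _ (fun p hp => h p (List.mem_cons_of_mem _ hp))
    · rw [if_neg hg, if_neg hg]
      exact ih _ (fun p hp => h p (List.mem_cons_of_mem _ hp))

-- ===== VERDICT (by name: the statement is the Claim_ definition above) =====
theorem get_adjacent_cells_spec : Claim_equal_get_adjacent_cells := by
  intro matrix x y adjacency direction _ hpre
  unfold Spec_get_adjacent_cells get_adjacent_cells get_adjacent_cells_alt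
  apply pvFoldl_guard_congr
  intro p hp hg
  cases direction with
  | false => simp
  | true =>
    by_cases hz : p.1 = 0 ∧ p.2 = 0
    · -- degenerate direction (0,0): Pre_ guarantees the focal cell is not floor
      have hin : pvInb matrix x y = true := by
        have := hg; rw [hz.1, hz.2, add_zero, add_zero] at this; exact this
      have hc : pvCell matrix x y ≠ "." := fun h => hpre.2 rfl p hp hz ⟨hin, h⟩
      have := pvZero_dir matrix x y (matrix.length + (matrix.headD []).length + 1) hin hc
      rw [hz.1, hz.2]
      simpa using this
    · -- genuine direction: capped ray = uncapped ray, then the walk/pick correspondence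
      have hg1 : pvInb matrix (x + 1 * p.1) (y + 1 * p.2) = true := by simpa using hg
      have hend := pvFuel_enough matrix x y p.1 p.2 hz (by simpa using hg)
      have hmain := walk_eq_pick matrix x y p.1 p.2
        (matrix.length + (matrix.headD []).length + 2) 1 hg1 hend
      have hcap := pvRay_eq_pvRayU matrix x y p.1 p.2 hz (by simpa using hg)
        (matrix.length + (matrix.headD []).length + 2) 1 le_rfl
      rw [hcap]
      simpa using hmain
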